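-- pv_equiv track=rewrite | github.com/MosesCommitsFraud/YGODeckBuilder-Backend | main.py | detect_archetypes
-- ===== SOURCE A (Python) =====
-- def detect_archetypes(card_id, card_info, archetypes):
--     """
--     Detects archetypes in a card's name and description using string matching.
--     Returns a set of archetypes found in the card.
--     """
--     if card_id not in card_info:
--         return set()
--
--     name = card_info[card_id].get("name", "").lower()
--     desc = card_info[card_id].get("desc", "").lower()
--     combined_text = name + " " + desc
--
--     found_archetypes = set()
--     for archetype in archetypes:
--         # Strip quotes and lowercase for comparison
--         clean_archetype = archetype.lower().strip('"')
--
--         if (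
--                 # Check for complete word match
--                 f" {clean_archetype} " in f" {combined_text} " or
--                 # Check for archetype at start of text
--                 combined_text.startswith(clean_archetype + " ") or
--                 # Check for archetype at end of text
--                 combined_text.endswith(" " + clean_archetype) or
--                 # Check for specific archetype patterns like "X-Type"
--                 f"{clean_archetype}-" in combined_text or
--                 # Check for possessive form
--                 f"{clean_archetype}'s" in combined_text
--         ):
--             found_archetypes.add(clean_archetype)
--
--     return found_archetypes
-- ===== SOURCE B (Python) =====
-- def detect_archetypes(card_id, card_info, archetypes):
--     """
--     Position-scan re-implementation: instead of testing padded/decorated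
--     substrings per archetype, scan the occurrence positions of the cleaned
--     archetype in the text once and check word-boundary / '-' / "'s"
--     conditions at each occurrence.
--     """
--     if card_id not in card_info:
--         return set()
--     info = card_info[card_id]
--     text = (info.get("name", "") + " " + info.get("desc", "")).lower()
--     n = len(text)
--     found = set()
--     for archetype in archetypes:
--         c = archetype.lower().strip('"')
--         m = len(c)
--         if any(
--             text[i:i + m] == c
--             and ((i == 0 or text[i - 1] == " ")
--                  and (i + m == n or text[i + m] == " ")
--                  or text[i + m:i + m + 1] == "-"
--                  or text[i + m:i + m + 2] == "'s")
--             for i in range(n - m + 1)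
--         ):
--             found.add(c)
--     return found
-- ===== Notes on version B (the rewrite author's own statement) =====
-- stated objective: alternative
-- what changed: B replaces A's five decorated-substring membership tests (padded whole-word, startswith, endswith, dash, possessive) by a single left-to-right scan over the occurrence positions of the cleaned archetype in the text, checking word-boundary characters and the following '-'/"'s" characters at each occurrence.
import Mathlib
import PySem

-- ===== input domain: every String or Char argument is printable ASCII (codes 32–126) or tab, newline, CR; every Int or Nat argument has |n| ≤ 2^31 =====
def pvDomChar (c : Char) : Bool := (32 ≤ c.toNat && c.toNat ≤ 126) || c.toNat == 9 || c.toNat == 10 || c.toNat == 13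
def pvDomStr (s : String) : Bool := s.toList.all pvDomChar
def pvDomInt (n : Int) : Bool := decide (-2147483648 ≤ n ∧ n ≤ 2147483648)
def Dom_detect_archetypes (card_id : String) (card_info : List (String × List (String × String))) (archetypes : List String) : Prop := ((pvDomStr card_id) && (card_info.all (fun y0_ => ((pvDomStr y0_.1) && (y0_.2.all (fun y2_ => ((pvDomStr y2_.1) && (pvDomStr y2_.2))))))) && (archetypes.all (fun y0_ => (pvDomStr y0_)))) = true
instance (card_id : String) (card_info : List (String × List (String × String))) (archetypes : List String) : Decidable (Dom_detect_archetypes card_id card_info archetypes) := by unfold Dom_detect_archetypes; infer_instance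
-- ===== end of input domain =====

-- B is an alternative of the same cost: instead of A's five decorated-substring membership
-- tests, B scans the occurrence positions of the cleaned archetype in the text and checks
-- word-boundary / '-' / "'s" conditions at each occurrence.

-- ===== PORT A =====
def detect_archetypes (card_id : String) (card_info : List (String × List (String × String))) (archetypes : List String) : List String :=
  match PySem.Dict.get? (PySem.Dict.mk card_info) card_id with
  | none => PySem.Set.empty
  | some info =>
    let name := PySem.Str.lower (PySem.Dict.getD (PySem.Dict.mk info) "name" "")
    let desc := PySem.Str.lower (PySem.Dict.getD (PySem.Dict.mk info) "desc" "")
    let combined_text := name ++ " " ++ desc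
    archetypes.foldl (fun found_archetypes archetype =>
      let clean_archetype := PySem.Str.stripChars (PySem.Str.lower archetype) "\""
      if PySem.Str.isIn (" " ++ clean_archetype ++ " ") (" " ++ combined_text ++ " ")
          || PySem.Str.startswith combined_text (clean_archetype ++ " ")
          || PySem.Str.endswith combined_text (" " ++ clean_archetype)
          || PySem.Str.isIn (clean_archetype ++ "-") combined_text
          || PySem.Str.isIn (clean_archetype ++ "'s") combined_text
      then PySem.Set.add found_archetypes clean_archetype
      else found_archetypes) PySem.Set.empty

-- ===== PORT B =====
def detect_archetypes_alt (card_id : String) (card_info : List (String × List (String × String))) (archetypes : List String) : List String :=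
  match PySem.Dict.get? (PySem.Dict.mk card_info) card_id with
  | none => PySem.Set.empty
  | some info =>
    let text := PySem.Str.lower
      (PySem.Dict.getD (PySem.Dict.mk info) "name" "" ++ " " ++ PySem.Dict.getD (PySem.Dict.mk info) "desc" "")
    let n := PySem.Str.len text
    archetypes.foldl (fun found archetype =>
      let c := PySem.Str.stripChars (PySem.Str.lower archetype) "\""
      let m := PySem.Str.len c
      if (PySem.List.pyRange 0 (n - m + 1) 1).any (fun i =>
          PySem.Str.slice text (some i) (some (i + m)) == c
          && ((i == 0 || PySem.Str.pyGet? text (i - 1) == some ' ')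
                && (i + m == n || PySem.Str.pyGet? text (i + m) == some ' ')
              || PySem.Str.slice text (some (i + m)) (some (i + m + 1)) == "-"
              || PySem.Str.slice text (some (i + m)) (some (i + m + 2)) == "'s"))
      then PySem.Set.add found c
      else found) PySem.Set.empty

-- ===== PRECONDITION & SPEC =====
def Spec_detect_archetypes (card_id : String) (card_info : List (String × List (String × String))) (archetypes : List String) (out : List String) : Prop := out = detect_archetypes_alt card_id card_info archetypes
instance (card_id : String) (card_info : List (String × List (String × String))) (archetypes : List String) (out : List String) : Decidable (Spec_detect_archetypes card_id card_info archetypes out) := by unfold Spec_detect_archetypes; infer_instance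

-- ===== CLAIM (what is proved, stated in full; the proofs are below) =====
def Claim_equal_detect_archetypes : Prop := ∀ (card_id : String) (card_info : List (String × List (String × String))) (archetypes : List String), Dom_detect_archetypes card_id card_info archetypes → Spec_detect_archetypes card_id card_info archetypes (detect_archetypes card_id card_info archetypes)

-- ===== LEMMAS AND PROOFS =====

-- 'pattern p matches s at index i' (with the in-bounds fact carried along)
def pvMatchAt (s p : List Char) (i : ℕ) : Prop :=
  i + p.length ≤ s.length ∧ (s.drop i).take p.length = p

-- an infix occurrence IS a match at some index
theorem pv_infix_iff (q s : List Char) : q <:+: s ↔ ∃ i, pvMatchAt s q i := by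
  constructor
  · rintro ⟨u, v, rfl⟩
    refine ⟨u.length, by simp, ?_⟩
    rw [List.append_assoc, List.drop_left, List.take_left]
  · rintro ⟨i, hle, heq⟩
    have h0 : s.take i ++ ((s.drop i).take q.length ++ (s.drop i).drop q.length) = s := by
      rw [List.take_append_drop, List.take_append_drop]
    rw [heq] at h0
    exact ⟨s.take i, (s.drop i).drop q.length, by rw [List.append_assoc]; exact h0⟩

theorem pv_matchAt_append (s p q : List Char) (i : ℕ) :
    pvMatchAt s (p ++ q) i ↔ pvMatchAt s p i ∧ pvMatchAt s q (i + p.length) := by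
  unfold pvMatchAt
  constructor
  · rintro ⟨hle, heq⟩
    simp only [List.length_append] at hle heq
    rw [List.take_add, List.drop_drop] at heq
    have hlen : ((s.drop i).take p.length).length = p.length := by
      rw [List.length_take, List.length_drop]; omega
    obtain ⟨h1, h2⟩ := List.append_inj heq (by rw [hlen])
    exact ⟨⟨by omega, h1⟩, by omega, h2⟩
  · rintro ⟨⟨h1, e1⟩, h2, e2⟩
    simp only [List.length_append]
    refine ⟨by omega, ?_⟩
    rw [List.take_add, List.drop_drop, e1, e2]

theorem pv_matchAt_singleton (s : List Char) (a : Char) (i : ℕ) :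
    pvMatchAt s [a] i ↔ s[i]? = some a := by
  unfold pvMatchAt
  cases h : s.drop i with
  | nil =>
    have hlen : s.length - i = 0 := by rw [← List.length_drop, h]; rfl
    have h0 : s[i]? = none := List.getElem?_eq_none (by omega)
    rw [h0]; simp
  | cons b l =>
    have hi : i < s.length := by
      by_contra hc
      rw [List.drop_eq_nil_of_le (by omega)] at h; cases h
    have h0 : s[i]? = some b := by
      rw [show s[i]? = (s.drop i)[0]? by simp [List.getElem?_drop], h]; rfl
    rw [h0]
    constructor
    · rintro ⟨-, e⟩; simpa using e
    · intro e
      refine ⟨by have h1 : [a].length = 1 := rfl; omega, ?_⟩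
      simpa using e

-- lifting a match through the padding ' ' :: s ++ [' ']
theorem pv_matchAt_pad (s p : List Char) (x y : Char) (j : ℕ) (h : j + p.length ≤ s.length) :
    pvMatchAt (x :: (s ++ [y])) p (j + 1) ↔ pvMatchAt s p j := by
  unfold pvMatchAt
  rw [List.drop_succ_cons, List.drop_append_of_le_length (by omega),
      List.take_append_of_le_length (by rw [List.length_drop]; omega)]
  simp only [List.length_cons, List.length_append]
  constructor
  · rintro ⟨-, e⟩; exact ⟨h, e⟩
  · rintro ⟨-, e⟩; exact ⟨by omega, e⟩

-- A's padded whole-word test, characterised by occurrence positions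
theorem pv_padded_iff (s p : List Char) :
    ((' ' :: (p ++ [' '])) <:+: (' ' :: (s ++ [' ']))) ↔
      ∃ i, pvMatchAt s p i ∧ (i = 0 ∨ s[i - 1]? = some ' ')
        ∧ (i + p.length = s.length ∨ s[i + p.length]? = some ' ') := by
  rw [show (' ' :: (p ++ [' '])) = [' '] ++ (p ++ [' ']) from rfl, pv_infix_iff]
  apply exists_congr; intro j
  rw [pv_matchAt_append, pv_matchAt_append, pv_matchAt_singleton, pv_matchAt_singleton]
  simp only [List.length_singleton]
  constructor
  · rintro ⟨h1, h2, h3⟩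
    obtain ⟨hlt, -⟩ := List.getElem?_eq_some_iff.mp h3
    simp only [List.length_cons, List.length_append, List.length_nil] at hlt
    have hb : j + p.length ≤ s.length := by omega
    refine ⟨(pv_matchAt_pad s p ' ' ' ' j hb).mp h2, ?_, ?_⟩
    · by_cases hj : j = 0
      · exact Or.inl hj
      · right
        obtain ⟨k, rfl⟩ : ∃ k, j = k + 1 := ⟨j - 1, by omega⟩
        rw [List.getElem?_cons_succ, List.getElem?_append_left (by omega)] at h1
        simpa using h1
    · rw [show j + 1 + p.length = (j + p.length) + 1 by omega, List.getElem?_cons_succ] at h3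
      by_cases hn : j + p.length = s.length
      · exact Or.inl hn
      · right
        rw [List.getElem?_append_left (by omega)] at h3
        exact h3
  · rintro ⟨hm, hl, hr⟩
    have hb : j + p.length ≤ s.length := hm.1
    refine ⟨?_, (pv_matchAt_pad s p ' ' ' ' j hb).mpr hm, ?_⟩
    · by_cases hj : j = 0
      · subst hj; simp
      · obtain ⟨k, rfl⟩ : ∃ k, j = k + 1 := ⟨j - 1, by omega⟩
        rcases hl with h0 | hl
        · exact absurd h0 (by omega)
        · rw [List.getElem?_cons_succ, List.getElem?_append_left (by omega)]
          simpa using hl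
    · rw [show j + 1 + p.length = (j + p.length) + 1 by omega, List.getElem?_cons_succ]
      rcases hr with hn | hr
      · rw [hn]; exact List.getElem?_concat_length
      · obtain ⟨hlt, -⟩ := List.getElem?_eq_some_iff.mp hr
        rw [List.getElem?_append_left hlt]
        exact hr

-- A's one-char-extension tests (c ++ "-")
theorem pv_ext1_iff (s p : List Char) (a : Char) :
    ((p ++ [a]) <:+: s) ↔ ∃ i, pvMatchAt s p i ∧ s[i + p.length]? = some a := by
  rw [pv_infix_iff]
  apply exists_congr; intro i
  rw [pv_matchAt_append, pv_matchAt_singleton]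

-- A's two-char-extension test (c ++ "'s")
theorem pv_ext2_iff (s p : List Char) (a b : Char) :
    ((p ++ [a, b]) <:+: s) ↔
      ∃ i, pvMatchAt s p i ∧ s[i + p.length]? = some a ∧ s[i + p.length + 1]? = some b := by
  rw [show ([a, b] : List Char) = [a] ++ [b] from rfl, ← List.append_assoc, pv_infix_iff]
  apply exists_congr; intro i
  rw [pv_matchAt_append, pv_matchAt_append, pv_matchAt_singleton, pv_matchAt_singleton]
  simp only [List.length_append, List.length_singleton, and_assoc]
  rw [show i + (p.length + 1) = i + p.length + 1 by omega]

-- lower distributes over concatenation (it is a per-character map)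
theorem pv_lower_append (a b : String) :
    PySem.Str.lower (a ++ b) = PySem.Str.lower a ++ PySem.Str.lower b := by
  apply String.toList_inj.mp
  simp [PySem.Str.toList_lower, String.toList_append, PySem.Chars.lower]

theorem pv_lower_space : PySem.Str.lower " " = " " := by decide

-- A's startswith check is subsumed by its padded whole-word check
theorem pv_start_imp (c t : String) (h : PySem.Str.startswith t (c ++ " ") = true) :
    PySem.Str.isIn (" " ++ c ++ " ") (" " ++ t ++ " ") = true := by
  rw [PySem.Str.startswith_eq, PySem.Chars.startswith_iff] at h
  rw [PySem.Str.isIn_eq, PySem.Chars.isIn_iff_infix]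
  simp only [String.toList_append] at h ⊢
  have hsp : (" ".toList : List Char) = [' '] := by decide
  rw [hsp]
  have h1 : (' ' :: (c.toList ++ [' '])) <+: (' ' :: t.toList) :=
    (List.cons_prefix_cons).mpr ⟨rfl, h⟩
  exact (List.IsPrefix.trans (by simpa using h1) (List.prefix_append _ [' '])).isInfix

-- A's endswith check is subsumed by its padded whole-word check
theorem pv_end_imp (c t : String) (h : PySem.Str.endswith t (" " ++ c) = true) :
    PySem.Str.isIn (" " ++ c ++ " ") (" " ++ t ++ " ") = true := by
  rw [PySem.Str.endswith_eq, PySem.Chars.endswith_iff] at h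
  rw [PySem.Str.isIn_eq, PySem.Chars.isIn_iff_infix]
  simp only [String.toList_append] at h ⊢
  have hsp : (" ".toList : List Char) = [' '] := by decide
  rw [hsp] at h ⊢
  obtain ⟨u, hu⟩ := h
  have h1 : ([' '] ++ c.toList ++ [' ']) <:+ (t.toList ++ [' ']) :=
    ⟨u, by rw [← hu]; simp⟩
  exact (List.IsSuffix.trans h1 (List.suffix_cons ' ' _)).isInfix

theorem pv_take1_iff (l : List Char) (a : Char) : l.take 1 = [a] ↔ l[0]? = some a := by
  cases l <;> simp

theorem pv_take2_iff (l : List Char) (a b : Char) :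
    l.take 2 = [a, b] ↔ (l[0]? = some a ∧ l[1]? = some b) := by
  match l with
  | [] => simp
  | [x] => simp
  | x :: y :: r => simp [List.take_succ_cons]

-- the three occurrence characterisations, merged over one occurrence index
theorem pv_scan_iff (s p : List Char) :
    (((∃ i, pvMatchAt s p i ∧ (i = 0 ∨ s[i - 1]? = some ' ')
          ∧ (i + p.length = s.length ∨ s[i + p.length]? = some ' '))
        ∨ (∃ i, pvMatchAt s p i ∧ s[i + p.length]? = some '-'))
      ∨ (∃ i, pvMatchAt s p i ∧ s[i + p.length]? = some '\'' ∧ s[i + p.length + 1]? = some 's'))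
    ↔ ∃ i, pvMatchAt s p i ∧
        (((i = 0 ∨ s[i - 1]? = some ' ') ∧ (i + p.length = s.length ∨ s[i + p.length]? = some ' ')
            ∨ s[i + p.length]? = some '-')
          ∨ (s[i + p.length]? = some '\'' ∧ s[i + p.length + 1]? = some 's')) := by
  constructor
  · rintro ((⟨i, h1, h2⟩ | ⟨i, h1, h2⟩) | ⟨i, h1, h2⟩) <;> exact ⟨i, h1, by tauto⟩
  · rintro ⟨i, h1, ((h | h) | h)⟩
    · exact Or.inl (Or.inl ⟨i, h1, h⟩)
    · exact Or.inl (Or.inr ⟨i, h1, h⟩)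
    · exact Or.inr ⟨i, h1, h⟩

-- B's per-position test, characterised at a natural index
theorem pv_f_eq (t c : String) (i : ℕ) (hb : i + c.toList.length ≤ t.toList.length) :
    (PySem.Str.slice t (some (i : Int)) (some ((i : Int) + PySem.Str.len c)) == c
      && (((i : Int) == 0 || PySem.Str.pyGet? t ((i : Int) - 1) == some ' ')
            && ((i : Int) + PySem.Str.len c == PySem.Str.len t
                || PySem.Str.pyGet? t ((i : Int) + PySem.Str.len c) == some ' ')
          || PySem.Str.slice t (some ((i : Int) + PySem.Str.len c)) (some ((i : Int) + PySem.Str.len c + 1)) == "-"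
          || PySem.Str.slice t (some ((i : Int) + PySem.Str.len c)) (some ((i : Int) + PySem.Str.len c + 2)) == "'s")) = true
    ↔ (pvMatchAt t.toList c.toList i ∧
        (((i = 0 ∨ t.toList[i - 1]? = some ' ')
              ∧ (i + c.toList.length = t.toList.length ∨ t.toList[i + c.toList.length]? = some ' ')
            ∨ t.toList[i + c.toList.length]? = some '-')
          ∨ (t.toList[i + c.toList.length]? = some '\''
              ∧ t.toList[i + c.toList.length + 1]? = some 's'))) := by
  have e1 : ((i : Int) + PySem.Str.len c) = ((i + c.toList.length : ℕ) : Int) := by simp [pysem]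
  have e2 : ((i : Int) + PySem.Str.len c + 1) = ((i + c.toList.length + 1 : ℕ) : Int) := by
    simp [pysem]
  have e3 : ((i : Int) + PySem.Str.len c + 2) = ((i + c.toList.length + 2 : ℕ) : Int) := by
    simp [pysem]
  rw [e2, e3, e1]
  simp only [pysem, Bool.and_eq_true, Bool.or_eq_true, beq_iff_eq, ← String.toList_inj,
    PySem.List.slice_natCast, Nat.cast_inj, Nat.cast_eq_zero, Nat.add_sub_cancel_left,
    show ("-" : String).toList = ['-'] from rfl, show ("'s" : String).toList = ['\'', 's'] from rfl,
    pv_take1_iff, pv_take2_iff, List.getElem?_drop, Nat.add_zero]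
  unfold pvMatchAt
  constructor
  · rintro ⟨htake, hrest⟩
    refine ⟨⟨hb, htake⟩, ?_⟩
    rcases hrest with (⟨hl, hr⟩ | hd) | hp
    · refine Or.inl (Or.inl ⟨?_, hr⟩)
      rcases hl with h0 | h1
      · exact Or.inl h0
      · by_cases h0 : i = 0
        · exact Or.inl h0
        · right
          rw [show ((i : Int) - 1) = ((i - 1 : ℕ) : Int) by omega, PySem.List.pyGet?_natCast] at h1
          exact h1
    · exact Or.inl (Or.inr hd)
    · exact Or.inr hp
  · rintro ⟨⟨-, htake⟩, hrest⟩
    refine ⟨htake, ?_⟩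
    rcases hrest with (⟨hl, hr⟩ | hd) | hp
    · refine Or.inl (Or.inl ⟨?_, hr⟩)
      rcases hl with h0 | h1
      · exact Or.inl h0
      · by_cases h0 : i = 0
        · exact Or.inl h0
        · right
          rw [show ((i : Int) - 1) = ((i - 1 : ℕ) : Int) by omega, PySem.List.pyGet?_natCast]
          exact h1
    · exact Or.inl (Or.inr hd)
    · exact Or.inr hp

-- A's three distinct tests (after dropping the subsumed two) as one test per archetype
theorem pv_cond_eq (c t : String) :
    (PySem.Str.isIn (" " ++ c ++ " ") (" " ++ t ++ " ")
      || PySem.Str.startswith t (c ++ " ")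
      || PySem.Str.endswith t (" " ++ c)
      || PySem.Str.isIn (c ++ "-") t
      || PySem.Str.isIn (c ++ "'s") t)
    = (PySem.Str.isIn (" " ++ c ++ " ") (" " ++ t ++ " ")
      || PySem.Str.isIn (c ++ "-") t
      || PySem.Str.isIn (c ++ "'s") t) := by
  cases hw : PySem.Str.isIn (" " ++ c ++ " ") (" " ++ t ++ " ") with
  | true => simp
  | false =>
    cases hs : PySem.Str.startswith t (c ++ " ") with
    | true => rw [pv_start_imp c t hs] at hw; cases hw
    | false =>
      cases he : PySem.Str.endswith t (" " ++ c) with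
      | true => rw [pv_end_imp c t he] at hw; cases hw
      | false => simp

-- the central per-archetype fact: A's five-way test equals B's occurrence scan
theorem pv_cond (c t : String) :
    (PySem.Str.isIn (" " ++ c ++ " ") (" " ++ t ++ " ")
      || PySem.Str.startswith t (c ++ " ")
      || PySem.Str.endswith t (" " ++ c)
      || PySem.Str.isIn (c ++ "-") t
      || PySem.Str.isIn (c ++ "'s") t)
    = (PySem.List.pyRange 0 (PySem.Str.len t - PySem.Str.len c + 1) 1).any (fun i =>
          PySem.Str.slice t (some i) (some (i + PySem.Str.len c)) == c
          && ((i == 0 || PySem.Str.pyGet? t (i - 1) == some ' ')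
                && (i + PySem.Str.len c == PySem.Str.len t || PySem.Str.pyGet? t (i + PySem.Str.len c) == some ' ')
              || PySem.Str.slice t (some (i + PySem.Str.len c)) (some (i + PySem.Str.len c + 1)) == "-"
              || PySem.Str.slice t (some (i + PySem.Str.len c)) (some (i + PySem.Str.len c + 2)) == "'s")) := by
  rw [pv_cond_eq, Bool.eq_iff_iff, List.any_eq_true]
  simp only [Bool.or_eq_true, PySem.Str.isIn_iff_infix, String.toList_append,
    show (" " : String).toList = [' '] from rfl, show ("-" : String).toList = ['-'] from rfl,
    show ("'s" : String).toList = ['\'', 's'] from rfl, List.cons_append]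
  rw [pv_padded_iff, pv_ext1_iff, pv_ext2_iff]
  simp only [List.nil_append]
  rw [pv_scan_iff]
  constructor
  · rintro ⟨i, hm, hcond⟩
    refine ⟨(i : Int), ?_, ?_⟩
    · rw [PySem.List.mem_pyRange_one]
      have := hm.1
      constructor
      · positivity
      · simp only [pysem]; omega
    · rw [pv_f_eq t c i hm.1]
      exact ⟨hm, hcond⟩
  · rintro ⟨x, hxmem, hx⟩
    rw [PySem.List.mem_pyRange_one] at hxmem
    obtain ⟨i, rfl⟩ : ∃ i : ℕ, x = (i : Int) := ⟨x.toNat, (Int.toNat_of_nonneg hxmem.1).symm⟩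
    have hb : i + c.toList.length ≤ t.toList.length := by
      have := hxmem.2
      simp only [pysem] at this
      omega
    rw [pv_f_eq t c i hb] at hx
    exact ⟨i, hx.1, hx.2⟩

-- ===== VERDICT (by name: the statement is the Claim_ definition above) =====
theorem detect_archetypes_spec : Claim_equal_detect_archetypes := by
  intro card_id card_info archetypes _
  unfold Spec_detect_archetypes detect_archetypes detect_archetypes_alt
  cases PySem.Dict.get? (PySem.Dict.mk card_info) card_id with
  | none => rfl
  | some info =>
    dsimp only
    simp only [pv_lower_append, pv_lower_space]
    refine PySem.List.foldl_congr_mem _ _ _ _ ?_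
    intro acc archetype _
    rw [pv_cond]
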